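-- pv_equiv track=rewrite | github.com/sonjuhyeon/programmers_coding_test | 프로그래머스/1/135808. 과일 장수/과일 장수.py | solution
-- ===== SOURCE A (Python) =====
-- def solution(k, m, score):
--     answer = 0
--     score.sort(reverse = True)
--     mod = len(score) % m
--     if mod:
--         score = score[:-mod]
--
--     for i in range(0, len(score), m):
--         box = score[i:i+m]
--         answer += min(box) * m
--     return answer
-- ===== SOURCE B (Python) =====
-- def solution(k, m, score):
--     # Count occurrences, then walk the distinct scores from high to low; a box
--     # is completed each time the cumulative count reaches the next multiple of m,
--     # and its minimum is the value being consumed at that moment.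
--     # (A sorts `score` in place; B leaves it untouched — return values agree.)
--     freq = {}
--     for v in score:
--         freq[v] = freq.get(v, 0) + 1
--     answer = 0
--     seen = 0
--     boundary = m
--     for v in sorted(freq, reverse=True):
--         seen += freq[v]
--         while 0 < boundary <= seen:
--             answer += v * m
--             boundary += m
--     return answer
-- ===== Notes on version B (the rewrite author's own statement) =====
-- stated objective: alternative
-- what changed: B never forms boxes at all: it builds a frequency dict in one pass, walks the distinct scores in descending order, and completes a box (adding v*m) each time the cumulative count crosses the next multiple of m - no full-list descending traversal of boxes, no slicing, no per-box min(), no remainder truncation, and score is not mutated.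
import Mathlib
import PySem

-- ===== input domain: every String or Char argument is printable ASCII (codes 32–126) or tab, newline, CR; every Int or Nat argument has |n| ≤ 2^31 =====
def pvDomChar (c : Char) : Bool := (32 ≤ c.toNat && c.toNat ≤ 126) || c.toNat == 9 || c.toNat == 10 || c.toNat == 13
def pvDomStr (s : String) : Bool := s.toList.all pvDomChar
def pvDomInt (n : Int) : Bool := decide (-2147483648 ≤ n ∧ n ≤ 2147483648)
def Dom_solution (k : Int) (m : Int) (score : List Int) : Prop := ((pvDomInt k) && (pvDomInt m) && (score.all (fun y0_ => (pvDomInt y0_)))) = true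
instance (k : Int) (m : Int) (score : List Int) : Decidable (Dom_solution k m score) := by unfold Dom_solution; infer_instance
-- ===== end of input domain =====

-- B counts occurrences and walks the DISTINCT scores in descending order, completing
-- a box whenever the cumulative count crosses the next multiple of m (objective:
-- alternative). NOTE: A sorts `score` in place, B does not mutate it; the
-- equivalence proved here is about the return value.

-- ===== PORT A =====
def solution (k : Int) (m : Int) (score : List Int) : Int :=
  let s := PySem.List.sorted score (fun x => x) true
  let md := PySem.Int.mod (PySem.List.len s) m
  let s2 := if md ≠ 0 then PySem.List.slice s none (some (-md)) else s
  (PySem.List.pyRange 0 (PySem.List.len s2) m).foldl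
    (fun answer i =>
      match PySem.List.min? (PySem.List.slice s2 (some i) (some (i + m))) (fun x => x) with
      | some v => answer + v * m
      | none => answer) 0

-- ===== PORT B =====
-- the inner `while 0 < boundary <= seen` loop; fuel only makes it total: when
-- 1 ≤ m the loop runs at most (seen - boundary).toNat + 1 times, and for m ≤ 0
-- the guard fails at once (boundary starts at m and is never repositioned).
def pvAltWhile (m v seen : Int) : Nat → Int × Int → Int × Int
  | 0, st => st
  | fuel + 1, (answer, boundary) =>
    if 0 < boundary ∧ boundary ≤ seen then
      pvAltWhile m v seen fuel (answer + v * m, boundary + m)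
    else (answer, boundary)

def solution_alt (k : Int) (m : Int) (score : List Int) : Int :=
  let freq := score.foldl (fun (d : PySem.Dict Int Int) v => d.insert v (d.getD v 0 + 1)) PySem.Dict.empty
  let st := (PySem.List.sorted freq.keys (fun x => x) true).foldl
    (fun (st : Int × Int × Int) v =>
      let seen := st.2.1 + freq.getD v 0
      let r := pvAltWhile m v seen ((seen - st.2.2).toNat + 1) (st.1, st.2.2)
      (r.1, seen, r.2)) (0, 0, m)
  st.1

-- ===== PRECONDITION & SPEC =====
-- Pre_ excludes only m = 0, where Python A raises ZeroDivisionError (len(score) % 0).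
def Pre_solution (k : Int) (m : Int) (score : List Int) : Prop := m ≠ 0
instance (k : Int) (m : Int) (score : List Int) : Decidable (Pre_solution k m score) := by unfold Pre_solution; infer_instance
def pvWitness_solution : Int × Int × List Int := (0, 2, [1, 2, 3, 1, 5])

def Spec_solution (k : Int) (m : Int) (score : List Int) (out : Int) : Prop := out = solution_alt k m score
instance (k : Int) (m : Int) (score : List Int) (out : Int) : Decidable (Spec_solution k m score out) := by unfold Spec_solution; infer_instance

-- ===== CLAIM (what is proved, stated in full; the proofs are below) =====
def Claim_equal_solution : Prop := ∀ (k : Int) (m : Int) (score : List Int), Dom_solution k m score → Pre_solution k m score → Spec_solution k m score (solution k m score)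

-- ===== LEMMAS AND PROOFS =====


lemma min?_desc_getLast (u : List Int) (hu : u.Pairwise (fun a b => b ≤ a)) (h : u ≠ []) :
    PySem.List.min? u (fun x => x) = some (u.getLast h) := by
  cases hmin : PySem.List.min? u (fun x => x) with
  | none => exact absurd ((PySem.List.min?_eq_none_iff u (fun x => x)).mp hmin) h
  | some v =>
    have hv : v ∈ u := PySem.List.min?_mem hmin
    have hisMin := PySem.List.min?_isMin hmin
    have h1 : v ≤ u.getLast h := hisMin _ (List.getLast_mem h)
    have h2 : u.getLast h ≤ v := by
      obtain ⟨i, hi, hiv⟩ := List.mem_iff_getElem.mp hv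
      rw [← hiv, List.getLast_eq_getElem]
      rcases Nat.lt_or_ge i (u.length - 1) with hlt | hge
      · exact (List.pairwise_iff_getElem.mp hu) i (u.length - 1) hi (by omega) hlt
      · have hieq : i = u.length - 1 := by omega
        subst hieq; exact le_rfl
    rw [le_antisymm h1 h2]

lemma chunk_min (t : List Int) (ht : t.Pairwise (fun a b => b ≤ a)) (mn j : Nat)
    (hmn : 0 < mn) (hle : mn * j + mn ≤ t.length) :
    PySem.List.min? ((t.drop (mn * j)).take mn) (fun x => x)
      = some (t.getD (mn * j + (mn - 1)) 0) := by
  have hlen : ((t.drop (mn * j)).take mn).length = mn := by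
    simp only [List.length_take, List.length_drop]
    omega
  have hne : (t.drop (mn * j)).take mn ≠ [] := by
    intro hnil; rw [hnil] at hlen; simp at hlen; omega
  have hp : ((t.drop (mn * j)).take mn).Pairwise (fun a b => b ≤ a) :=
    List.Pairwise.sublist ((List.take_sublist _ _).trans (List.drop_sublist _ _)) ht
  rw [min?_desc_getLast _ hp hne]
  congr 1
  rw [List.getLast_eq_getElem]
  have hidx : mn * j + (mn - 1) < t.length := by omega
  rw [List.getD_eq_getElem _ _ hidx]
  simp only [hlen, List.getElem_take, List.getElem_drop]

lemma rangeA (mn q : Nat) (hmn : 0 < mn) :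
    PySem.List.pyRange 0 ((mn * q : Nat) : Int) (mn : Int)
      = (List.range q).map (fun (j : Nat) => (0 : Int) + (mn : Int) * (j : Int)) := by
  rw [PySem.List.pyRange_of_pos _ _ (by exact_mod_cast hmn : (0:Int) < (mn:Int))]
  have hc : (if (0:Int) < ((mn * q : Nat) : Int) then
        ((((mn * q : Nat) : Int) - 0 + (mn : Int) - 1) / (mn : Int)).toNat else 0) = q := by
    split_ifs with h
    · have h1 : ((mn * q : Nat) : Int) - 0 + (mn : Int) - 1 = ((mn * q + (mn - 1) : Nat) : Int) := by
        omega
      rw [h1, ← Int.natCast_div, Int.toNat_natCast, Nat.mul_add_div hmn,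
        Nat.div_eq_of_lt (by omega), Nat.add_zero]
    · have h0 : mn * q = 0 := by omega
      rcases Nat.mul_eq_zero.mp h0 with h' | h' <;> omega
  rw [hc]

lemma sum_map_mul_right_int (l : List Nat) (f : Nat → Int) (c : Int) :
    ((l.map fun j => f j * c).sum) = (l.map f).sum * c := by
  induction l with
  | nil => simp
  | cons x xs ih => simp [ih]; ring

lemma key_fold (s : List Int) (mn q : Nat) (hmn : 0 < mn) (hq : mn * q ≤ s.length)
    (hps : s.Pairwise (fun a b => b ≤ a)) :
    List.foldl (fun (answer i : Int) =>
        match PySem.List.min? (PySem.List.slice (s.take (mn * q)) (some i) (some (i + (mn : Int))))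
            (fun x => x) with
        | some v => answer + v * (mn : Int)
        | none => answer) 0 ((List.range q).map (fun (j : Nat) => (0 : Int) + (mn : Int) * (j : Int)))
    = (mn : Int) * ((List.range q).map (fun (j : Nat) => s.getD (mn * j + (mn - 1)) 0)).sum := by
  have hpt : (s.take (mn * q)).Pairwise (fun a b => b ≤ a) :=
    List.Pairwise.sublist (List.take_sublist _ _) hps
  have hgetD : ∀ j : Nat, j < q →
      (s.take (mn * q)).getD (mn * j + (mn - 1)) 0 = s.getD (mn * j + (mn - 1)) 0 := by
    intro j hjq
    have hmul : mn * (j + 1) ≤ mn * q := Nat.mul_le_mul_left mn hjq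
    have hmul2 : mn * (j + 1) = mn * j + mn := by ring
    have h1 : mn * j + (mn - 1) < (s.take (mn * q)).length := by
      rw [List.length_take]; omega
    have h2 : mn * j + (mn - 1) < s.length := by omega
    rw [List.getD_eq_getElem _ _ h1, List.getD_eq_getElem _ _ h2, List.getElem_take]
  have hA1 : List.foldl (fun (answer i : Int) =>
        match PySem.List.min? (PySem.List.slice (s.take (mn * q)) (some i) (some (i + (mn : Int))))
            (fun x => x) with
        | some v => answer + v * (mn : Int)
        | none => answer) 0 ((List.range q).map (fun (j : Nat) => (0 : Int) + (mn : Int) * (j : Int)))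
      = List.foldl (fun (a i : Int) => a + s.getD (i.toNat + (mn - 1)) 0 * (mn : Int)) 0
          ((List.range q).map (fun (j : Nat) => (0 : Int) + (mn : Int) * (j : Int))) := by
    apply PySem.List.foldl_congr_mem
    intro acc i hi
    obtain ⟨j, hj, rfl⟩ := List.mem_map.mp hi
    have hjq : j < q := List.mem_range.mp hj
    have hmul : mn * (j + 1) ≤ mn * q := Nat.mul_le_mul_left mn hjq
    have hmul2 : mn * (j + 1) = mn * j + mn := by ring
    have hle : mn * j + mn ≤ (s.take (mn * q)).length := by
      rw [List.length_take]; omega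
    have hidx : (0 : Int) + (mn : Int) * (j : Int) = ((mn * j : Nat) : Int) := by
      push_cast; ring
    show (match PySem.List.min? (PySem.List.slice (s.take (mn * q))
            (some ((0 : Int) + (mn : Int) * (j : Int)))
            (some ((0 : Int) + (mn : Int) * (j : Int) + (mn : Int)))) (fun x => x) with
        | some v => acc + v * (mn : Int)
        | none => acc)
      = acc + s.getD (((0 : Int) + (mn : Int) * (j : Int)).toNat + (mn - 1)) 0 * (mn : Int)
    rw [hidx, Int.toNat_natCast, PySem.List.slice_natCast_add (s.take (mn * q)) (mn * j) mn,
      chunk_min (s.take (mn * q)) hpt mn j hmn hle]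
    show acc + (s.take (mn * q)).getD (mn * j + (mn - 1)) 0 * (mn : Int)
      = acc + s.getD (mn * j + (mn - 1)) 0 * (mn : Int)
    rw [hgetD j hjq]
  rw [hA1, PySem.List.foldl_add, List.map_map]
  have hmapA : ((List.range q).map ((fun (i : Int) => s.getD (i.toNat + (mn - 1)) 0 * (mn : Int)) ∘
        (fun (j : Nat) => (0 : Int) + (mn : Int) * (j : Int))))
      = (List.range q).map (fun j => s.getD (mn * j + (mn - 1)) 0 * (mn : Int)) := by
    apply List.map_congr_left
    intro j hj
    show s.getD (((0 : Int) + (mn : Int) * (j : Int)).toNat + (mn - 1)) 0 * (mn : Int)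
      = s.getD (mn * j + (mn - 1)) 0 * (mn : Int)
    rw [show (0 : Int) + (mn : Int) * (j : Int) = ((mn * j : Nat) : Int) by push_cast; ring,
      Int.toNat_natCast]
  rw [hmapA, sum_map_mul_right_int]
  ring

lemma solutionA_closed (k : Int) (mn : Nat) (hmn : 0 < mn) (score : List Int) :
    solution k (mn : Int) score
      = (mn : Int) * ((List.range ((PySem.List.sorted score (fun x => x) true).length / mn)).map
          (fun (j : Nat) => (PySem.List.sorted score (fun x => x) true).getD (mn * j + (mn - 1)) 0)).sum := by
  simp only [solution, PySem.List.len_eq]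
  set s := PySem.List.sorted score (fun x => x) true with hs
  have hps : s.Pairwise (fun a b => b ≤ a) := PySem.List.sorted_pairwise_rev score (fun x => x)
  have hdm := Nat.div_add_mod s.length mn
  have hmd : PySem.Int.mod ((s.length : Nat) : Int) ((mn : Nat) : Int) = ((s.length % mn : Nat) : Int) := by
    simp [PySem.Int.mod, Int.fmod_eq_emod]
  rw [hmd]
  have hs2 : (if ((s.length % mn : Nat) : Int) ≠ 0 then
        PySem.List.slice s none (some (-((s.length % mn : Nat) : Int))) else s)
      = s.take (mn * (s.length / mn)) := by
    by_cases hr0 : s.length % mn = 0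
    · rw [hr0, if_neg (by simp), Nat.mul_div_cancel' (Nat.dvd_of_mod_eq_zero hr0), List.take_length]
    · have hrpos : 0 < s.length % mn := Nat.pos_of_ne_zero hr0
      rw [if_pos (by exact_mod_cast hr0), PySem.List.slice_to_neg_natCast s _ hrpos]
      congr 1
      omega
  rw [hs2]
  have hq : mn * (s.length / mn) ≤ s.length := by omega
  have hlen : (s.take (mn * (s.length / mn))).length = mn * (s.length / mn) := by
    rw [List.length_take]; omega
  rw [hlen, rangeA mn (s.length / mn) hmn]
  exact key_fold s mn (s.length / mn) hmn hq hps

-- ---------- B-side ----------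


lemma pvAltWhile_stop (m v seen a b : Int) (fuel : Nat) (h : ¬ (0 < b ∧ b ≤ seen)) :
    pvAltWhile m v seen fuel (a, b) = (a, b) := by
  cases fuel with
  | zero => rfl
  | succ n => rw [pvAltWhile, if_neg h]

lemma pvAltWhile_closed (m v : Int) (hm : 1 ≤ m) :
    ∀ (fuel : Nat) (seen ans boundary : Int), 0 < boundary →
      (seen - boundary).toNat < fuel →
      pvAltWhile m v seen fuel (ans, boundary)
        = (ans + v * m * (if boundary ≤ seen then (seen - boundary) / m + 1 else 0),
           boundary + m * (if boundary ≤ seen then (seen - boundary) / m + 1 else 0)) := by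
  intro fuel
  induction fuel with
  | zero => intro seen ans b hb hf; omega
  | succ n ih =>
    intro seen ans b hb hf
    by_cases hle : b ≤ seen
    · by_cases hle2 : b + m ≤ seen
      · have h1 : (0:Int) < b + m := by omega
        have h2 : (seen - (b + m)).toNat < n := by omega
        rw [pvAltWhile, if_pos ⟨hb, hle⟩, ih seen (ans + v * m) (b + m) h1 h2,
          if_pos hle2, if_pos hle]
        have hd : (seen - b) / m = (seen - (b + m)) / m + 1 := by
          have h0 : seen - b = (seen - (b + m)) + 1 * m := by ring
          rw [h0, Int.add_mul_ediv_right _ _ (by omega : m ≠ 0)]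
        rw [hd]; simp only [Prod.mk.injEq]; constructor <;> ring
      · rw [pvAltWhile, if_pos ⟨hb, hle⟩,
          pvAltWhile_stop m v seen _ _ n (by omega), if_pos hle]
        have hq : (seen - b) / m = 0 := by
          apply Int.ediv_eq_zero_of_lt <;> omega
        rw [hq]; simp only [Prod.mk.injEq]; constructor <;> ring
    · rw [pvAltWhile, if_neg (by tauto), if_neg hle]
      simp only [Prod.mk.injEq]; constructor <;> ring


lemma count_flatMap_replicate (ks : List Int) (hnd : ks.Nodup) (cnt : Int → Nat) (a : Int) :
    (ks.flatMap (fun v => List.replicate (cnt v) v)).count a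
      = if a ∈ ks then cnt a else 0 := by
  induction ks with
  | nil => simp
  | cons v rest ih =>
    have hnd' := hnd
    simp only [List.nodup_cons] at hnd'
    simp only [List.flatMap_cons, List.count_append, List.count_replicate,
      List.mem_cons, ih hnd'.2]
    by_cases hav : a = v
    · subst hav
      simp [if_neg (fun h => hnd'.1 h)]
    · simp only [beq_iff_eq, if_neg (fun h : v = a => hav h.symm)]
      simp [hav]
lemma pairwise_flatMap_replicate (ks : List Int) (hp : ks.Pairwise (fun a b => b < a))
    (cnt : Int → Nat) :
    (ks.flatMap (fun v => List.replicate (cnt v) v)).Pairwise (fun a b => b ≤ a) := by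
  induction ks with
  | nil => simp
  | cons v rest ih =>
    simp only [List.pairwise_cons] at hp
    simp only [List.flatMap_cons]
    rw [List.pairwise_append]
    refine ⟨?_, ?_, ?_⟩
    · exact List.pairwise_replicate.mpr (Or.inr le_rfl)
    · exact ih hp.2
    · intro x hx y hy
      obtain rfl := List.eq_of_mem_replicate hx
      obtain ⟨w, hw, hyw⟩ := List.mem_flatMap.mp hy
      obtain rfl := List.eq_of_mem_replicate hyw
      exact le_of_lt (hp.1 _ hw)

lemma desc_perm_eq (l1 l2 : List Int) (hperm : l1.Perm l2)
    (h1 : l1.Pairwise (fun a b => b ≤ a)) (h2 : l2.Pairwise (fun a b => b ≤ a)) : l1 = l2 :=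
  hperm.eq_of_pairwise (fun _ _ _ _ hab hba => le_antisymm hba hab) h1 h2

lemma sorted_eq_flatMap (score : List Int) :
    PySem.List.sorted score (fun x => x) true
      = (PySem.List.sorted (PySem.Set.ofList score) (fun x => x) true).flatMap
          (fun v => List.replicate (score.count v) v) := by
  set ks := PySem.List.sorted (PySem.Set.ofList score) (fun x => x) true with hks
  have hndks : ks.Nodup :=
    ((PySem.List.sorted_perm (PySem.Set.ofList score) (fun x => x) true).nodup_iff).mpr
      (PySem.Set.nodup_ofList score)
  have hmemks : ∀ a : Int, a ∈ ks ↔ a ∈ score := by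
    intro a
    rw [hks, PySem.List.mem_sorted]
    exact PySem.Set.mem_ofList (y := a) (xs := score)
  have hpks : ks.Pairwise (fun a b => b < a) := by
    have hge : ks.Pairwise (fun a b => b ≤ a) :=
      PySem.List.sorted_pairwise_rev (PySem.Set.ofList score) (fun x => x)
    have hne : ks.Pairwise (fun a b => a ≠ b) := hndks
    exact (hge.and hne).imp (fun h => lt_of_le_of_ne h.1 (Ne.symm h.2))
  apply desc_perm_eq
  · rw [List.perm_iff_count]
    intro a
    rw [count_flatMap_replicate ks hndks _ a,
      (PySem.List.sorted_perm score (fun x => x) true).count_eq]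
    by_cases ha : a ∈ score
    · rw [if_pos ((hmemks a).mpr ha)]
    · rw [if_neg (fun h => ha ((hmemks a).mp h)), List.count_eq_zero_of_not_mem ha]
  · exact PySem.List.sorted_pairwise_rev score (fun x => x)
  · exact pairwise_flatMap_replicate ks hpks _


lemma outer_fold (mn : Nat) (hmn : 0 < mn) (d : List Int) (c : Int → Int) (cnt : Int → Nat) :
    ∀ (ks : List Int), (∀ v ∈ ks, c v = (cnt v : Int)) → (∀ v ∈ ks, 1 ≤ cnt v) →
      ∀ (S : Nat) (ans : Int), S ≤ d.length →
      d.drop S = ks.flatMap (fun v => List.replicate (cnt v) v) →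
      (ks.foldl (fun (st : Int × Int × Int) v =>
          let seen := st.2.1 + c v
          let r := pvAltWhile (mn : Int) v seen ((seen - st.2.2).toNat + 1) (st.1, st.2.2)
          (r.1, seen, r.2)) (ans, (S : Int), ((mn * (S / mn) + mn : Nat) : Int))).1
        = ans + (mn : Int) * ((List.range (d.length / mn - S / mn)).map
            (fun j => d.getD (mn * (S / mn + j) + (mn - 1)) 0)).sum := by
  intro ks
  induction ks with
  | nil =>
    intro _ _ S ans hS hdrop
    have hlen : d.length = S := by
      have := congrArg List.length hdrop
      simp only [List.length_drop, List.flatMap_nil, List.length_nil] at this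
      omega
    simp [hlen]
  | cons v rest ih =>
    intro hc hpos S ans hS hdrop
    have hcv : c v = (cnt v : Int) := hc v List.mem_cons_self
    have hcv1 : 1 ≤ cnt v := hpos v List.mem_cons_self
    have hdlen : d.length - S = cnt v + (rest.flatMap (fun v => List.replicate (cnt v) v)).length := by
      have := congrArg List.length hdrop
      simpa using this
    have hS' : S + cnt v ≤ d.length := by omega
    set S' : Nat := S + cnt v with hS'def
    have hdrop' : d.drop S' = rest.flatMap (fun v => List.replicate (cnt v) v) := by
      rw [hS'def, ← List.drop_drop, hdrop, List.flatMap_cons,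
        List.drop_left' (List.length_replicate)]
    set p := S / mn with hp
    set p' := S' / mn with hp'
    have hpp' : p ≤ p' := Nat.div_le_div_right (by omega)
    set q := d.length / mn with hq
    have hp'q : p' ≤ q := Nat.div_le_div_right hS'
    have hdmS : mn * p + S % mn = S := by rw [hp]; exact Nat.div_add_mod S mn
    have hmodS : S % mn < mn := Nat.mod_lt S hmn
    have hdmS' : mn * p' + S' % mn = S' := by rw [hp']; exact Nat.div_add_mod S' mn
    have hmodS' : S' % mn < mn := Nat.mod_lt S' hmn
    have hmn1' : (p + 1) * mn = mn * p + mn := by ring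
    have hb0 : (0 : Int) < ((mn * p + mn : Nat) : Int) := by positivity
    have hseen : (S : Int) + c v = ((S' : Nat) : Int) := by rw [hcv]; omega
    have hclosed := pvAltWhile_closed (mn : Int) v (by exact_mod_cast hmn)
      ((((S' : Nat) : Int) - ((mn * p + mn : Nat) : Int)).toNat + 1)
      ((S' : Nat) : Int) ans ((mn * p + mn : Nat) : Int) hb0 (by omega)
    have hmn1 : mn * (p + 1) = mn * p + mn := by ring
    have htv : (if ((mn * p + mn : Nat) : Int) ≤ ((S' : Nat) : Int) then
          (((S' : Nat) : Int) - ((mn * p + mn : Nat) : Int)) / (mn : Int) + 1 else 0)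
        = ((p' - p : Nat) : Int) := by
      by_cases hble : mn * p + mn ≤ S'
      · rw [if_pos (by exact_mod_cast hble)]
        have hple : p + 1 ≤ p' := by
          rw [hp', Nat.le_div_iff_mul_le hmn]
          omega
        have hcast : ((S' : Nat) : Int) - ((mn * p + mn : Nat) : Int)
            = ((S' - (mn * p + mn) : Nat) : Int) := by omega
        have hmul : mn * (p' - (p + 1)) + mn * (p + 1) = mn * p' := by
          rw [← Nat.mul_add]; congr 1; omega
        have hX : S' - (mn * p + mn) = mn * (p' - (p + 1)) + S' % mn := by omega
        rw [hcast, ← Int.natCast_div, hX, Nat.mul_add_div hmn, Nat.div_eq_of_lt hmodS']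
        omega
      · rw [if_neg (by exact_mod_cast hble)]
        have hp'lt : p' < p + 1 := by
          rw [hp', Nat.div_lt_iff_lt_mul hmn]
          omega
        have hpe : p' = p := by omega
        rw [hpe]
        simp
    rw [List.foldl_cons]
    simp only [hseen, hclosed, htv]
    have hbnd : ((mn * p + mn : Nat) : Int) + (mn : Int) * ((p' - p : Nat) : Int)
        = ((mn * p' + mn : Nat) : Int) := by
      have hmul2 : mn * (p' - p) + mn * p = mn * p' := by
        rw [← Nat.mul_add]; congr 1; omega
      omega
    rw [hbnd]
    rw [ih (fun w hw => hc w (List.mem_cons_of_mem v hw))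
        (fun w hw => hpos w (List.mem_cons_of_mem v hw)) S' _ hS' hdrop']
    have hsplit : q - p = (p' - p) + (q - p') := by omega
    rw [hsplit, List.range_add, List.map_append, List.sum_append]
    have hfirst : ((List.range (p' - p)).map (fun j => d.getD (mn * (p + j) + (mn - 1)) 0))
        = List.replicate (p' - p) v := by
      have hall : ∀ b ∈ (List.range (p' - p)).map
          (fun j => d.getD (mn * (p + j) + (mn - 1)) 0), b = v := by
        intro b hb
        obtain ⟨j, hj, rfl⟩ := List.mem_map.mp hb
        have hjlt : j < p' - p := List.mem_range.mp hj
        have hA : mn * (p + j + 1) = mn * (p + j) + mn := by ring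
        have hB : mn * (p + j + 1) ≤ mn * p' := Nat.mul_le_mul_left _ (by omega)
        have hC : mn * p' ≤ S' := by
          rw [Nat.mul_comm]
          exact Nat.div_mul_le_self _ _
        have hE : mn * p ≤ mn * (p + j) := Nat.mul_le_mul_left _ (by omega)
        have hiS : S ≤ mn * (p + j) + (mn - 1) := by omega
        have hiS' : mn * (p + j) + (mn - 1) < S' := by omega
        have hid : mn * (p + j) + (mn - 1) < d.length := by omega
        obtain ⟨kk, hkk, hklt⟩ : ∃ kk, mn * (p + j) + (mn - 1) = S + kk ∧ kk < cnt v :=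
          ⟨mn * (p + j) + (mn - 1) - S, by omega, by omega⟩
        rw [hkk, List.getD_eq_getElem?_getD, ← List.getElem?_drop, hdrop, List.flatMap_cons,
          List.getElem?_append_left (by simpa using hklt)]
        simp [hklt]
      calc ((List.range (p' - p)).map (fun j => d.getD (mn * (p + j) + (mn - 1)) 0))
          = List.replicate ((List.range (p' - p)).map
              (fun j => d.getD (mn * (p + j) + (mn - 1)) 0)).length v :=
            List.eq_replicate_length.mpr hall
        _ = List.replicate (p' - p) v := by simp
    have hsecond : ((List.range (q - p')).map (fun x => (p' - p) + x)).map
          (fun j => d.getD (mn * (p + j) + (mn - 1)) 0)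
        = (List.range (q - p')).map (fun j => d.getD (mn * (p' + j) + (mn - 1)) 0) := by
      rw [List.map_map]
      apply List.map_congr_left
      intro j _
      show d.getD (mn * (p + ((p' - p) + j)) + (mn - 1)) 0 = _
      have hpj : p + ((p' - p) + j) = p' + j := by omega
      rw [hpj]
    simp only [← hp']
    rw [hfirst, hsecond, List.sum_replicate, nsmul_eq_mul]
    ring

-- ---------- final glue ----------

lemma neg_fold (m : Int) (hm : m < 0) (c : Int → Int) : ∀ (ks : List Int) (ans seen : Int),
    (ks.foldl (fun (st : Int × Int × Int) v =>
        let sn := st.2.1 + c v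
        let r := pvAltWhile m v sn ((sn - st.2.2).toNat + 1) (st.1, st.2.2)
        (r.1, sn, r.2)) (ans, seen, m)).1 = ans := by
  intro ks
  induction ks with
  | nil => intro ans seen; rfl
  | cons v rest ih =>
    intro ans seen
    rw [List.foldl_cons]
    simp only
    rw [pvAltWhile_stop m v _ ans m _ (by omega)]
    exact ih ans (seen + c v)

lemma main_neg (k m : Int) (hm : m < 0) (score : List Int) :
    solution k m score = solution_alt k m score := by
  have hA : solution k m score = 0 := by
    simp only [solution, PySem.List.len_eq]
    have h1 : ∀ (u : List Int), PySem.List.pyRange 0 ((u.length : Nat) : Int) m = [] := by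
      intro u
      simp [PySem.List.pyRange, show m ≠ 0 by omega, show ¬((0:Int) < m) by omega,
        show ¬(((u.length : Nat) : Int) < 0) by omega]
    rw [h1]
    rfl
  have hB : solution_alt k m score = 0 := by
    simp only [solution_alt]
    exact neg_fold m hm _ _ 0 0
  rw [hA, hB]

lemma main_pos (k : Int) (mn : Nat) (hmn : 0 < mn) (score : List Int) :
    solution k (mn : Int) score = solution_alt k (mn : Int) score := by
  set s := PySem.List.sorted score (fun x => x) true with hs
  set ks := PySem.List.sorted (PySem.Set.ofList score) (fun x => x) true with hksdef
  have hc : ∀ v ∈ ks, (PySem.Dict.counter score).getD v 0 = ((score.count v : Nat) : Int) :=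
    fun v _ => PySem.Dict.getD_counter ..
  have hpos : ∀ v ∈ ks, 1 ≤ score.count v := by
    intro v hv
    rw [hksdef, PySem.List.mem_sorted, PySem.Set.mem_ofList] at hv
    exact List.count_pos_iff.mpr hv
  have hdrop0 : s.drop 0 = ks.flatMap (fun v => List.replicate (score.count v) v) := by
    rw [List.drop_zero, hs, hksdef]
    exact sorted_eq_flatMap score
  have hout := outer_fold mn hmn s (fun v => (PySem.Dict.counter score).getD v 0)
    (fun v => score.count v) ks hc hpos 0 0 (Nat.zero_le _) hdrop0
  simp only [Nat.zero_div, Nat.mul_zero, Nat.cast_zero, Nat.sub_zero, zero_add] at hout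
  have halt : solution_alt k (mn : Int) score
      = (ks.foldl (fun (st : Int × Int × Int) v =>
          let seen := st.2.1 + (PySem.Dict.counter score).getD v 0
          let r := pvAltWhile (mn : Int) v seen ((seen - st.2.2).toNat + 1) (st.1, st.2.2)
          (r.1, seen, r.2)) (0, (0 : Int), (mn : Int))).1 := by
    simp only [solution_alt, PySem.Dict.foldl_insert_getD_add_one_eq_counter,
      PySem.Dict.keys_counter]
    rw [← hksdef]
  rw [halt, hout, solutionA_closed k mn hmn score]

-- ===== VERDICT (by name: the statement is the Claim_ definition above) =====
theorem solution_spec : Claim_equal_solution := by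
  intro k m score _ hpre
  unfold Spec_solution
  rcases lt_or_gt_of_ne hpre with h | h
  · exact main_neg k m h score
  · obtain ⟨mn, rfl⟩ := Int.eq_ofNat_of_zero_le (le_of_lt h)
    exact main_pos k mn (by exact_mod_cast h) score
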